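-- pv_equiv track=rewrite | github.com/ndijjlaw/clorizon_assessment | simple_recommendation_engine.py | build_cooccurrence_matrix
-- ===== SOURCE A (Python) =====
-- from collections import defaultdict
--
-- def build_cooccurrence_matrix(user_history):
--
--     # Builds a mapping of item_A -> {item_B: count}, showing what items are likely to follow one another in user interactions.
--
--     co_matrix = defaultdict(lambda: defaultdict(int))
--
--     for user, history in user_history.items():
--         items = [record[1] for record in history]
--
--         for i in range(len(items) - 1):
--             item_A = items[i]
--             item_B = items[i + 1]
--             co_matrix[item_A][item_B] += 1
--
--     return co_matrix
-- ===== SOURCE B (Python) =====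
-- from collections import defaultdict
--
--
-- def build_cooccurrence_matrix(user_history):
--     # Pass 1: flatten all histories into one stream of consecutive item pairs
--     # and tally each pair once.
--     pairs = []
--     for history in user_history.values():
--         items = [record[1] for record in history]
--         pairs.extend(zip(items, items[1:]))
--     counts = defaultdict(int)
--     for pair in pairs:
--         counts[pair] += 1
--     # Pass 2: reshape the flat pair counter into the nested matrix.
--     co_matrix = defaultdict(lambda: defaultdict(int))
--     for (item_a, item_b), n in counts.items():
--         co_matrix[item_a][item_b] = n
--     return co_matrix
-- ===== Notes on version B (the rewrite author's own statement) =====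
-- stated objective: alternative
-- what changed: Replaces the fused per-user index loop that increments a nested dict-of-dicts with a two-pass pipeline: first flatten all histories into one stream of consecutive pairs and tally them in a flat pair counter, then reshape that counter's (pair, count) items into the nested matrix.
import Mathlib
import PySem

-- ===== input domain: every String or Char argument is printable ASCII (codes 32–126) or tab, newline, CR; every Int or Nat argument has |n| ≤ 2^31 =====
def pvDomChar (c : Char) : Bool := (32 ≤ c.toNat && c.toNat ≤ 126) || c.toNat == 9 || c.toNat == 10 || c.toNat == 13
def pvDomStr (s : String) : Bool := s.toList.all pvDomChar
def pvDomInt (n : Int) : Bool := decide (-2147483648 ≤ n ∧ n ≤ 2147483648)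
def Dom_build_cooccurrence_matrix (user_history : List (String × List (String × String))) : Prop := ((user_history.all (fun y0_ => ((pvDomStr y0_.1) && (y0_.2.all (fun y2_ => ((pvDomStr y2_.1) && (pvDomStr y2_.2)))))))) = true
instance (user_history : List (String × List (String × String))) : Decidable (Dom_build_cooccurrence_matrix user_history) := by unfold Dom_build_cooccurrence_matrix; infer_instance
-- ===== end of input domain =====

-- B replaces A's fused per-user loop that increments a nested dict-of-dicts with a two-pass
-- pipeline: flatten all histories into one stream of consecutive pairs and tally them in a
-- flat pair counter, then reshape the counter's items into the nested matrix (objective: alternative).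

-- ===== PORT A =====
-- co_matrix is a defaultdict of defaultdicts: co_matrix[a][b] += 1 is
-- modify a empty (fun inner => inner.modify b 0 (· + 1)); the returned nested dict is its items.
def build_cooccurrence_matrix (user_history : List (String × List (String × String))) : List (String × List (String × Int)) :=
  let co_matrix : PySem.Dict String (PySem.Dict String Int) :=
    user_history.foldl (fun co_matrix p =>
      let items := p.2.map (fun record => record.2)
      (PySem.List.pyRange 0 ((items.length : Int) - 1) 1).foldl (fun co_matrix i =>
        let item_A := PySem.List.pyGetD items i ""
        let item_B := PySem.List.pyGetD items (i + 1) ""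
        co_matrix.modify item_A PySem.Dict.empty (fun inner => inner.modify item_B 0 (· + 1)))
        co_matrix)
      PySem.Dict.empty
  co_matrix.items.map (fun q => (q.1, q.2.items))

-- ===== PORT B =====
-- pairs.extend(zip(items, items[1:])) is acc ++ items.zip (items.drop 1) (exact: zip truncates
-- to the shorter list in both languages); counts is a flat defaultdict(int) over pairs.
def build_cooccurrence_matrix_alt (user_history : List (String × List (String × String))) : List (String × List (String × Int)) :=
  let pairs : List (String × String) :=
    user_history.foldl (fun acc p =>
      let items := p.2.map (fun record => record.2)
      acc ++ items.zip (items.drop 1)) []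
  let counts : PySem.Dict (String × String) Int :=
    pairs.foldl (fun d pair => d.modify pair 0 (· + 1)) PySem.Dict.empty
  let co_matrix : PySem.Dict String (PySem.Dict String Int) :=
    counts.items.foldl (fun co_matrix q =>
      co_matrix.modify q.1.1 PySem.Dict.empty (fun inner => inner.insert q.1.2 q.2))
      PySem.Dict.empty
  co_matrix.items.map (fun q => (q.1, q.2.items))

-- ===== PRECONDITION & SPEC =====
def Spec_build_cooccurrence_matrix (user_history : List (String × List (String × String))) (out : List (String × List (String × Int))) : Prop := out = build_cooccurrence_matrix_alt user_history
instance (user_history : List (String × List (String × String))) (out : List (String × List (String × Int))) : Decidable (Spec_build_cooccurrence_matrix user_history out) := by unfold Spec_build_cooccurrence_matrix; infer_instance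

-- ===== CLAIM (what is proved, stated in full; the proofs are below) =====
def Claim_equal_build_cooccurrence_matrix : Prop := ∀ (user_history : List (String × List (String × String))), Dom_build_cooccurrence_matrix user_history → Spec_build_cooccurrence_matrix user_history (build_cooccurrence_matrix user_history)

-- ===== LEMMAS AND PROOFS =====

-- the loop bodies of the two ports, as named step functions
def pvStepA (co : PySem.Dict String (PySem.Dict String Int)) (p : String × String) : PySem.Dict String (PySem.Dict String Int) :=
  co.modify p.1 PySem.Dict.empty (fun inner => inner.modify p.2 0 (· + 1))

def pvStepB (co : PySem.Dict String (PySem.Dict String Int)) (q : (String × String) × Int) : PySem.Dict String (PySem.Dict String Int) :=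
  co.modify q.1.1 PySem.Dict.empty (fun inner => inner.insert q.1.2 q.2)

def pvAllPairs (user_history : List (String × List (String × String))) : List (String × String) :=
  user_history.flatMap (fun p => (p.2.map (fun record => record.2)).zip ((p.2.map (fun record => record.2)).drop 1))

-- generic Dict facts ------------------------------------------------------

theorem pv_not_contains_key {κ ν : Type} [BEq κ] [LawfulBEq κ] (d : PySem.Dict κ ν)
    {k : κ} (h : d.contains k = false) : ∀ q ∈ d.items, (q.1 == k) = false := by
  intro q hq
  by_contra hq1
  have : d.items.any (fun p => p.1 == k) = true := List.any_eq_true.2 ⟨q, hq, by simpa using hq1⟩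
  simp [PySem.Dict.contains] at h
  exact absurd (h q.1 q.2 hq) (by simpa using hq1)

theorem pv_insert_insert_same {κ ν : Type} [BEq κ] [LawfulBEq κ] (d : PySem.Dict κ ν)
    (k : κ) (v w : ν) : (d.insert k v).insert k w = d.insert k w := by
  by_cases hc : d.contains k = true
  · have h2 : (d.insert k v).contains k = true := PySem.Dict.contains_insert_self d k v
    apply PySem.Dict.ext
    rw [PySem.Dict.items_insert_of_contains _ _ h2, PySem.Dict.items_insert_of_contains _ _ hc,
      PySem.Dict.items_insert_of_contains _ _ hc, List.map_map]
    apply List.map_congr_left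
    intro q _
    by_cases hk : (q.1 == k) = true <;> simp [Function.comp, hk]
  · have hc' : d.contains k = false := by simpa using hc
    have h2 : (d.insert k v).contains k = true := PySem.Dict.contains_insert_self d k v
    apply PySem.Dict.ext
    rw [PySem.Dict.items_insert_of_contains _ _ h2, PySem.Dict.items_insert_of_not_contains _ _ hc',
      PySem.Dict.items_insert_of_not_contains _ _ hc', List.map_append]
    have hmap : List.map (fun p => if (p.1 == k) = true then (k, w) else p) d.items = d.items := by
      calc List.map (fun p => if (p.1 == k) = true then (k, w) else p) d.items
          = List.map id d.items := by
            apply List.map_congr_left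
            intro q hq
            simp [pv_not_contains_key d hc' q hq]
        _ = d.items := List.map_id _
    simp [hmap]

theorem pv_insert_comm {κ ν : Type} [BEq κ] [LawfulBEq κ] (d : PySem.Dict κ ν)
    {k k' : κ} (x y : ν) (h : d.contains k = true) (hne : k' ≠ k) :
    (d.insert k' x).insert k y = (d.insert k y).insert k' x := by
  have hbne : (k' == k) = false := by simpa using hne
  have hbne' : (k == k') = false := by simpa using (Ne.symm hne)
  by_cases hc' : d.contains k' = true
  · have h1 : (d.insert k' x).contains k = true := by
      rw [PySem.Dict.contains_insert]; simp [h]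
    have h2 : (d.insert k y).contains k' = true := by
      rw [PySem.Dict.contains_insert]; simp [hc']
    apply PySem.Dict.ext
    rw [PySem.Dict.items_insert_of_contains _ _ h1, PySem.Dict.items_insert_of_contains _ _ hc',
      PySem.Dict.items_insert_of_contains _ _ h2, PySem.Dict.items_insert_of_contains _ _ h,
      List.map_map, List.map_map]
    apply List.map_congr_left
    intro q _
    by_cases hk' : (q.1 == k') = true
    · have : (q.1 == k) = false := by
        have : q.1 = k' := by simpa using hk'
        simp [this, hbne]
      simp [Function.comp, hk', this, hbne]
    · by_cases hk : (q.1 == k) = true <;>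
        simp [Function.comp, hk', hk, hbne']
  · have hc'' : d.contains k' = false := by simpa using hc'
    have h1 : (d.insert k' x).contains k = true := by
      rw [PySem.Dict.contains_insert]; simp [h]
    have h2 : (d.insert k y).contains k' = false := by
      rw [PySem.Dict.contains_insert]; simp [hbne, hc'']
    apply PySem.Dict.ext
    rw [PySem.Dict.items_insert_of_contains _ _ h1, PySem.Dict.items_insert_of_not_contains _ _ hc'',
      PySem.Dict.items_insert_of_not_contains _ _ h2, PySem.Dict.items_insert_of_contains _ _ h,
      List.map_append]
    simp
    exact fun h => absurd h hne

-- inner keys of the reshape fold come from the pair keys ------------------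

theorem pv_innerkeys (l : List ((String × String) × Int)) :
    ∀ (co : PySem.Dict String (PySem.Dict String Int)) (a b : String),
      (((l.foldl pvStepB co).getD a PySem.Dict.empty).contains b) = true →
      ((co.getD a PySem.Dict.empty).contains b = true) ∨ (a, b) ∈ l.map (·.1) := by
  induction l with
  | nil => intro co a b h; exact Or.inl h
  | cons q t ih =>
    intro co a b h
    rcases ih (pvStepB co q) a b h with h1 | h1
    · by_cases ha : a = q.1.1
      · subst ha
        rw [pvStepB, PySem.Dict.modify, PySem.Dict.getD_insert_self] at h1
        rw [PySem.Dict.contains_insert] at h1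
        rcases Bool.or_eq_true_iff.1 h1 with hb | hb
        · right
          have : b = q.1.2 := by simpa using hb
          simp [this]
        · exact Or.inl hb
      · rw [pvStepB, PySem.Dict.modify, PySem.Dict.getD_insert_of_ne _ _ _ ha] at h1
        exact Or.inl h1
    · right; rw [List.map_cons]; exact List.mem_cons_of_mem _ h1

-- commuting a pvStepA bump past later pvStepB steps -----------------------

theorem pv_comm (co : PySem.Dict String (PySem.Dict String Int)) (p : String × String)
    (r : (String × String) × Int) (hco : co.contains p.1 = true)
    (hin : ((co.getD p.1 PySem.Dict.empty).contains p.2) = true) (hr : r.1 ≠ p) :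
    pvStepA (pvStepB co r) p = pvStepB (pvStepA co p) r := by
  by_cases ha : r.1.1 = p.1
  · have hb : r.1.2 ≠ p.2 := by
      intro hb; exact hr (Prod.ext ha hb)
    simp only [pvStepA, pvStepB, PySem.Dict.modify, ha, PySem.Dict.getD_insert_self]
    rw [PySem.Dict.getD_insert_of_ne _ _ _ (fun h => hb h.symm),
      pv_insert_insert_same, pv_insert_insert_same,
      pv_insert_comm _ _ _ hin hb]
  · simp only [pvStepA, pvStepB, PySem.Dict.modify]
    rw [PySem.Dict.getD_insert_of_ne _ _ _ (fun h => ha h.symm),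
      PySem.Dict.getD_insert_of_ne _ _ _ ha]
    exact pv_insert_comm co _ _ hco ha

theorem pv_pres_contains (co : PySem.Dict String (PySem.Dict String Int))
    (r : (String × String) × Int) (a : String) (h : co.contains a = true) :
    (pvStepB co r).contains a = true := by
  rw [pvStepB, PySem.Dict.modify, PySem.Dict.contains_insert]; simp [h]

theorem pv_pres_inner (co : PySem.Dict String (PySem.Dict String Int))
    (r : (String × String) × Int) (a b : String)
    (h : ((co.getD a PySem.Dict.empty).contains b) = true) :
    (((pvStepB co r).getD a PySem.Dict.empty).contains b) = true := by
  rw [pvStepB, PySem.Dict.modify]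
  by_cases ha : a = r.1.1
  · subst ha
    rw [PySem.Dict.getD_insert_self, PySem.Dict.contains_insert]; simp [h]
  · rw [PySem.Dict.getD_insert_of_ne _ _ _ ha]; exact h

theorem pv_foldcomm (t : List ((String × String) × Int)) :
    ∀ (co : PySem.Dict String (PySem.Dict String Int)) (p : String × String),
      (∀ r ∈ t, r.1 ≠ p) → co.contains p.1 = true →
      ((co.getD p.1 PySem.Dict.empty).contains p.2) = true →
      pvStepA (t.foldl pvStepB co) p = t.foldl pvStepB (pvStepA co p) := by
  induction t with
  | nil => intro co p _ _ _; rfl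
  | cons r t ih =>
    intro co p hne hco hin
    have hr : r.1 ≠ p := hne r (by simp)
    calc pvStepA ((r :: t).foldl pvStepB co) p
        = pvStepA (t.foldl pvStepB (pvStepB co r)) p := rfl
      _ = t.foldl pvStepB (pvStepA (pvStepB co r) p) := by
          exact ih (pvStepB co r) p (fun s hs => hne s (by simp [hs]))
            (pv_pres_contains co r p.1 hco) (pv_pres_inner co r p.1 p.2 hin)
      _ = t.foldl pvStepB (pvStepB (pvStepA co p) r) := by
          rw [pv_comm co p r hco hin hr]
      _ = (r :: t).foldl pvStepB (pvStepA co p) := rfl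

-- bumping the count of an existing pair key -------------------------------

theorem pv_bump (l : List ((String × String) × Int)) :
    ∀ (co : PySem.Dict String (PySem.Dict String Int)) (p : String × String),
      (l.map (·.1)).Nodup → p ∈ l.map (·.1) →
      (l.map (fun q => if (q.1 == p) = true then (q.1, q.2 + 1) else q)).foldl pvStepB co
        = pvStepA (l.foldl pvStepB co) p := by
  induction l with
  | nil => intro co p _ hm; simp at hm
  | cons q t ih =>
    intro co p hnd hm
    rw [List.map_cons, List.nodup_cons] at hnd
    have hnd' : (t.map (·.1)).Nodup := hnd.2
    by_cases hq : q.1 = p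
    · have hqb : (q.1 == p) = true := by simpa using hq
      have hnotin : p ∉ t.map (·.1) := hq ▸ hnd.1
      have hmap : t.map (fun s => if (s.1 == p) = true then (s.1, s.2 + 1) else s) = t := by
        calc t.map (fun s => if (s.1 == p) = true then (s.1, s.2 + 1) else s)
            = t.map id := by
              apply List.map_congr_left
              intro s hs
              have : s.1 ≠ p := by
                intro h; exact hnotin (by simpa [h.symm] using List.mem_map_of_mem (f := (·.1)) hs)
              simp [this]
          _ = t := List.map_id _
      have hstep : pvStepB co (q.1, q.2 + 1) = pvStepA (pvStepB co q) p := by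
        subst hq
        simp only [pvStepA, pvStepB, PySem.Dict.modify, PySem.Dict.getD_insert_self,
          pv_insert_insert_same]
      calc ((q :: t).map (fun s => if (s.1 == p) = true then (s.1, s.2 + 1) else s)).foldl pvStepB co
          = t.foldl pvStepB (pvStepB co (q.1, q.2 + 1)) := by
            simp only [List.map_cons, hqb, if_pos, List.foldl_cons, hmap]
        _ = t.foldl pvStepB (pvStepA (pvStepB co q) p) := by rw [hstep]
        _ = pvStepA (t.foldl pvStepB (pvStepB co q)) p := by
            refine (pv_foldcomm t (pvStepB co q) p ?_ ?_ ?_).symm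
            · intro r hr h
              exact hnotin (by simpa [h.symm] using List.mem_map_of_mem (f := (·.1)) hr)
            · simp only [pvStepB, PySem.Dict.modify, hq, PySem.Dict.contains_insert]; simp
            · simp only [pvStepB, PySem.Dict.modify, hq, PySem.Dict.getD_insert_self]
              exact PySem.Dict.contains_insert_self _ _ _
        _ = pvStepA ((q :: t).foldl pvStepB co) p := rfl
    · have hqb : (q.1 == p) = false := by simpa using hq
      have hm' : p ∈ t.map (·.1) := by
        rw [List.map_cons] at hm
        rcases List.mem_cons.1 hm with h | h
        · exact absurd h.symm hq
        · exact h
      calc ((q :: t).map (fun s => if (s.1 == p) = true then (s.1, s.2 + 1) else s)).foldl pvStepB co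
          = (t.map (fun s => if (s.1 == p) = true then (s.1, s.2 + 1) else s)).foldl pvStepB (pvStepB co q) := by
            simp only [List.map_cons, hqb, List.foldl_cons]
            rfl
        _ = pvStepA (t.foldl pvStepB (pvStepB co q)) p := ih (pvStepB co q) p hnd' hm'
        _ = pvStepA ((q :: t).foldl pvStepB co) p := rfl

-- one counter step corresponds to one pvStepA step on the reshaped dict ---

theorem pv_core (c : PySem.Dict (String × String) Int) (p : String × String)
    (hnd : c.keys.Nodup) :
    (c.modify p 0 (· + 1)).items.foldl pvStepB PySem.Dict.empty
      = pvStepA (c.items.foldl pvStepB PySem.Dict.empty) p := by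
  by_cases hc : c.contains p = true
  · rw [PySem.Dict.modify, PySem.Dict.items_insert_of_contains _ _ hc]
    have hmap : c.items.map (fun q => if (q.1 == p) = true then (p, c.getD p 0 + 1) else q)
        = c.items.map (fun q => if (q.1 == p) = true then (q.1, q.2 + 1) else q) := by
      apply List.map_congr_left
      intro q hq
      by_cases hk : (q.1 == p) = true
      · have hk' : q.1 = p := by simpa using hk
        have hv : c.getD p 0 = q.2 := by
          have : (p, q.2) ∈ c.items := by rw [← hk']; exact hq
          exact PySem.Dict.getD_of_mem_items c this hnd 0
        simp [hk', hv]
      · simp [hk]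
    rw [hmap]
    apply pv_bump
    · exact hnd
    · have := PySem.Dict.contains_eq_decide_mem_keys c p
      rw [hc] at this
      exact of_decide_eq_true this.symm
  · have hc' : c.contains p = false := by simpa using hc
    rw [PySem.Dict.modify, PySem.Dict.getD_of_not_contains c 0 hc',
      PySem.Dict.items_insert_of_not_contains _ _ hc', List.foldl_append]
    have hnotin : (((c.items.foldl pvStepB PySem.Dict.empty).getD p.1 PySem.Dict.empty).contains p.2) = false := by
      by_contra h
      have h' := pv_innerkeys c.items PySem.Dict.empty p.1 p.2 (by simpa using h)
      rcases h' with h1 | h1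
      · simp [PySem.Dict.getD, PySem.Dict.get?, PySem.Dict.empty, PySem.Dict.contains] at h1
      · have hmem : p ∈ c.keys := by simpa [PySem.Dict.keys] using h1
        have hcont := PySem.Dict.contains_eq_decide_mem_keys c p
        rw [hc'] at hcont
        exact absurd hmem (of_decide_eq_false hcont.symm)
    rw [List.foldl_cons, List.foldl_nil]
    simp only [pvStepA, pvStepB, PySem.Dict.modify,
      PySem.Dict.getD_of_not_contains _ 0 hnotin]

theorem pv_main (ps : List (String × String)) :
    ∀ (c : PySem.Dict (String × String) Int), c.keys.Nodup →
      ((ps.foldl (fun d x => d.modify x 0 (· + 1)) c).items.foldl pvStepB PySem.Dict.empty)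
        = ps.foldl pvStepA (c.items.foldl pvStepB PySem.Dict.empty) := by
  induction ps with
  | nil => intro c _; rfl
  | cons p t ih =>
    intro c hnd
    have hnd' : (c.modify p 0 (· + 1)).keys.Nodup := PySem.Dict.nodup_keys_insert c p _ hnd
    calc ((p :: t).foldl (fun d x => d.modify x 0 (· + 1)) c).items.foldl pvStepB PySem.Dict.empty
        = ((t.foldl (fun d x => d.modify x 0 (· + 1)) (c.modify p 0 (· + 1))).items.foldl pvStepB PySem.Dict.empty) := rfl
      _ = t.foldl pvStepA ((c.modify p 0 (· + 1)).items.foldl pvStepB PySem.Dict.empty) := ih _ hnd'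
      _ = t.foldl pvStepA (pvStepA (c.items.foldl pvStepB PySem.Dict.empty) p) := by rw [pv_core c p hnd]
      _ = (p :: t).foldl pvStepA (c.items.foldl pvStepB PySem.Dict.empty) := rfl

-- A's indexed inner loop is a fold over the consecutive-pair list ---------

theorem pv_zip_eq (items : List String) :
    (PySem.List.pyRange 0 ((items.length : Int) - 1) 1).map
        (fun i => (PySem.List.pyGetD items i "", PySem.List.pyGetD items (i + 1) ""))
      = items.zip (items.drop 1) := by
  apply List.ext_getElem
  · simp only [List.length_map, PySem.List.length_pyRange_one, List.length_zip, List.length_drop]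
    omega
  · intro k h1 h2
    have hk : k < items.length - 1 := by
      simp [PySem.List.length_pyRange_one] at h1
      omega
    simp only [List.getElem_map, PySem.List.getElem_pyRange_one, zero_add, List.getElem_zip,
      List.getElem_drop]
    have e1 : PySem.List.pyGetD items (k : Int) "" = items[k] := by
      rw [PySem.List.pyGetD_natCast]
      exact List.getD_eq_getElem items "" (by omega)
    have e2 : PySem.List.pyGetD items ((k : Int) + 1) "" = items[1 + k] := by
      have : ((k : Int) + 1) = ((k + 1 : Nat) : Int) := by push_cast; ring
      rw [this, PySem.List.pyGetD_natCast]
      have := List.getD_eq_getElem items "" (n := k + 1) (by omega)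
      rw [this]
      congr 1
      omega
    rw [e1, e2]

theorem pv_user_fold (items : List String) (co : PySem.Dict String (PySem.Dict String Int)) :
    (PySem.List.pyRange 0 ((items.length : Int) - 1) 1).foldl (fun co i =>
        co.modify (PySem.List.pyGetD items i "") PySem.Dict.empty
          (fun inner => inner.modify (PySem.List.pyGetD items (i + 1) "") 0 (· + 1))) co
      = (items.zip (items.drop 1)).foldl pvStepA co := by
  rw [← pv_zip_eq items, List.foldl_map]
  rfl

theorem pv_outer (user_history : List (String × List (String × String))) :
    ∀ (co : PySem.Dict String (PySem.Dict String Int)),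
      user_history.foldl (fun co p =>
        let items := p.2.map (fun record => record.2)
        (PySem.List.pyRange 0 ((items.length : Int) - 1) 1).foldl (fun co i =>
          co.modify (PySem.List.pyGetD items i "") PySem.Dict.empty
            (fun inner => inner.modify (PySem.List.pyGetD items (i + 1) "") 0 (· + 1))) co) co
      = (pvAllPairs user_history).foldl pvStepA co := by
  induction user_history with
  | nil => intro co; rfl
  | cons p t ih =>
    intro co
    simp only [List.foldl_cons]
    rw [ih, pv_user_fold]
    conv_rhs => rw [pvAllPairs, List.flatMap_cons, List.foldl_append]
    rw [pvAllPairs]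

theorem pv_a_eq (user_history : List (String × List (String × String))) :
    build_cooccurrence_matrix user_history
      = ((pvAllPairs user_history).foldl pvStepA PySem.Dict.empty).items.map (fun q => (q.1, q.2.items)) := by
  exact congrArg (fun d => d.items.map (fun q => (q.1, q.2.items))) (pv_outer user_history PySem.Dict.empty)

theorem pv_b_eq (user_history : List (String × List (String × String))) :
    build_cooccurrence_matrix_alt user_history
      = (((pvAllPairs user_history).foldl (fun d x => d.modify x 0 (· + 1)) PySem.Dict.empty).items.foldl
          pvStepB PySem.Dict.empty).items.map (fun q => (q.1, q.2.items)) := by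
  simp only [build_cooccurrence_matrix_alt]
  rw [PySem.List.foldl_append_eq_flatMap, List.nil_append]
  rfl

-- ===== VERDICT (by name: the statement is the Claim_ definition above) =====
theorem build_cooccurrence_matrix_spec : Claim_equal_build_cooccurrence_matrix := by
  intro user_history _
  unfold Spec_build_cooccurrence_matrix
  rw [pv_a_eq, pv_b_eq, pv_main (pvAllPairs user_history) PySem.Dict.empty PySem.Dict.nodup_keys_empty]
  rfl
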